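-- pv_equiv track=rewrite | github.com/yunwoong7/aws-idp-pipeline | packages/infra/src/functions/api/document-management/handlers/document_handlers.py | _calculate_analysis_stats
-- ===== SOURCE A (Python) =====
-- from typing import Dict, Any
--
-- def _calculate_analysis_stats(segments: list) -> Dict[str, int]:
--     """Calculate analysis status statistics"""
--     stats = {
--         'total_segments': len(segments),
--         'completed_segments': 0,
--         'processing_segments': 0,
--         'error_segments': 0,
--         'pending_segments': 0
--     }
--
--     for segment in segments:
--         status = segment.get('status', 'pending')
--         if status == 'completed':
--             stats['completed_segments'] += 1
--         elif status == 'processing':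
--             stats['processing_segments'] += 1
--         elif status == 'error':
--             stats['error_segments'] += 1
--         else:
--             stats['pending_segments'] += 1
--
--     return stats
-- ===== SOURCE B (Python) =====
-- from typing import Dict, Any
--
-- def _calculate_analysis_stats(segments: list) -> Dict[str, int]:
--     """Calculate analysis status statistics (independent passes; pending by subtraction)"""
--     total = len(segments)
--     completed = sum(1 for s in segments if s.get('status', 'pending') == 'completed')
--     processing = sum(1 for s in segments if s.get('status', 'pending') == 'processing')
--     error = sum(1 for s in segments if s.get('status', 'pending') == 'error')
--     return {
--         'total_segments': total,
--         'completed_segments': completed,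
--         'processing_segments': processing,
--         'error_segments': error,
--         'pending_segments': total - completed - processing - error
--     }
-- ===== Notes on version B (the rewrite author's own statement) =====
-- stated objective: alternative
-- what changed: Replaces the single-pass if/elif dict-counter loop with three independent counting passes (one per named status) plus len(), deriving the pending bucket arithmetically as total - completed - processing - error instead of counting the else branch.
import Mathlib
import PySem

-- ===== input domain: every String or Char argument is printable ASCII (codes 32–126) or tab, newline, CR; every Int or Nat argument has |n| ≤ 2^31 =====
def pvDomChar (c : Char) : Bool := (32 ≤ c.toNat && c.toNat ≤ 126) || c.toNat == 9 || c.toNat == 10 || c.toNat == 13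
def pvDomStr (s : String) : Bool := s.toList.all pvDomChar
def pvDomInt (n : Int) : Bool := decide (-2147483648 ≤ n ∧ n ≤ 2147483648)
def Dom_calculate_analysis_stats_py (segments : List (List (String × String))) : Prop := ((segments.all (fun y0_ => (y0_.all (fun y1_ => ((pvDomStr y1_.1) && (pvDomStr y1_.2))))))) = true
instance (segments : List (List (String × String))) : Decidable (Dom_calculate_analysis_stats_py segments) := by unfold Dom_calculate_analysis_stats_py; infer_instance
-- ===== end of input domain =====

-- B replaces A's single-pass if/elif dict counter by independent counting passes, deriving the pending bucket by subtraction (alternative decomposition, same cost).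

-- shared primitive: segment.get('status', 'pending') (first match in the association list)
def pvGetStatus (seg : List (String × String)) : String :=
  PySem.Dict.getD (PySem.Dict.mk seg) "status" "pending"

-- ===== PORT A =====
-- loop body of A: the if/elif chain incrementing the matching counter (stats[k] += 1)
def pvStatsStep (stats : PySem.Dict String Int) (segment : List (String × String)) :
    PySem.Dict String Int :=
  let status := pvGetStatus segment
  if status == "completed" then stats.modify "completed_segments" 0 (· + 1)
  else if status == "processing" then stats.modify "processing_segments" 0 (· + 1)
  else if status == "error" then stats.modify "error_segments" 0 (· + 1)
  else stats.modify "pending_segments" 0 (· + 1)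

def calculate_analysis_stats_py (segments : List (List (String × String))) : List (String × Int) :=
  let stats : PySem.Dict String Int := PySem.Dict.mk
    [("total_segments", (segments.length : Int)), ("completed_segments", 0),
     ("processing_segments", 0), ("error_segments", 0), ("pending_segments", 0)]
  let stats := segments.foldl pvStatsStep stats
  stats.items

-- ===== PORT B =====
def calculate_analysis_stats_py_alt (segments : List (List (String × String))) : List (String × Int) :=
  let total : Int := segments.length
  let completed : Int := segments.countP (fun s => pvGetStatus s == "completed")
  let processing : Int := segments.countP (fun s => pvGetStatus s == "processing")
  let error : Int := segments.countP (fun s => pvGetStatus s == "error")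
  [("total_segments", total), ("completed_segments", completed),
   ("processing_segments", processing), ("error_segments", error),
   ("pending_segments", total - completed - processing - error)]

-- ===== PRECONDITION & SPEC =====
def Spec_calculate_analysis_stats_py (segments : List (List (String × String))) (out : List (String × Int)) : Prop := out = calculate_analysis_stats_py_alt segments
instance (segments : List (List (String × String))) (out : List (String × Int)) : Decidable (Spec_calculate_analysis_stats_py segments out) := by unfold Spec_calculate_analysis_stats_py; infer_instance

-- ===== CLAIM (what is proved, stated in full; the proofs are below) =====
def Claim_equal_calculate_analysis_stats_py : Prop := ∀ (segments : List (List (String × String))), Dom_calculate_analysis_stats_py segments → Spec_calculate_analysis_stats_py segments (calculate_analysis_stats_py segments)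

-- ===== LEMMAS AND PROOFS =====

-- ===== VERDICT (by name: the statement is the Claim_ definition above) =====
lemma stats_fold_items (segments : List (List (String × String)))
    (n c p e q : Int) :
    (segments.foldl pvStatsStep
      (PySem.Dict.mk
        [("total_segments", n), ("completed_segments", c),
         ("processing_segments", p), ("error_segments", e), ("pending_segments", q)])).items =
    [("total_segments", n),
     ("completed_segments", c + segments.countP (fun s => pvGetStatus s == "completed")),
     ("processing_segments", p + segments.countP (fun s => pvGetStatus s == "processing")),
     ("error_segments", e + segments.countP (fun s => pvGetStatus s == "error")),
     ("pending_segments", q + segments.countP (fun s =>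
        ¬ (pvGetStatus s == "completed" ∨ pvGetStatus s == "processing" ∨ pvGetStatus s == "error")))] := by
  induction segments generalizing c p e q with
  | nil => simp
  | cons hd tl ih =>
    rw [List.foldl_cons]
    by_cases h1 : pvGetStatus hd == "completed"
    · have hstep : pvStatsStep (PySem.Dict.mk
        [("total_segments", n), ("completed_segments", c),
         ("processing_segments", p), ("error_segments", e), ("pending_segments", q)]) hd =
        PySem.Dict.mk
        [("total_segments", n), ("completed_segments", c + 1),
         ("processing_segments", p), ("error_segments", e), ("pending_segments", q)] := by
        simp [pvStatsStep, h1, PySem.Dict.modify, PySem.Dict.contains, PySem.Dict.insert,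
          PySem.Dict.getD, PySem.Dict.get?]
      rw [hstep, ih]
      have he : pvGetStatus hd = "completed" := by simpa using h1
      simp [he]
      ring
    · by_cases h2 : pvGetStatus hd == "processing"
      · have hstep : pvStatsStep (PySem.Dict.mk
          [("total_segments", n), ("completed_segments", c),
           ("processing_segments", p), ("error_segments", e), ("pending_segments", q)]) hd =
          PySem.Dict.mk
          [("total_segments", n), ("completed_segments", c),
           ("processing_segments", p + 1), ("error_segments", e), ("pending_segments", q)] := by
          simp [pvStatsStep, h1, h2, PySem.Dict.modify, PySem.Dict.contains, PySem.Dict.insert,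
            PySem.Dict.getD, PySem.Dict.get?]
        rw [hstep, ih]
        have he : pvGetStatus hd = "processing" := by simpa using h2
        have hne : pvGetStatus hd ≠ "completed" := by simpa using h1
        simp [he]
        ring
      · by_cases h3 : pvGetStatus hd == "error"
        · have hstep : pvStatsStep (PySem.Dict.mk
            [("total_segments", n), ("completed_segments", c),
             ("processing_segments", p), ("error_segments", e), ("pending_segments", q)]) hd =
            PySem.Dict.mk
            [("total_segments", n), ("completed_segments", c),
             ("processing_segments", p), ("error_segments", e + 1), ("pending_segments", q)] := by
            simp [pvStatsStep, h1, h2, h3, PySem.Dict.modify, PySem.Dict.contains, PySem.Dict.insert,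
              PySem.Dict.getD, PySem.Dict.get?]
          rw [hstep, ih]
          have he : pvGetStatus hd = "error" := by simpa using h3
          have hn1 : pvGetStatus hd ≠ "completed" := by simpa using h1
          have hn2 : pvGetStatus hd ≠ "processing" := by simpa using h2
          simp [he]
          ring
        · have hstep : pvStatsStep (PySem.Dict.mk
            [("total_segments", n), ("completed_segments", c),
             ("processing_segments", p), ("error_segments", e), ("pending_segments", q)]) hd =
            PySem.Dict.mk
            [("total_segments", n), ("completed_segments", c),
             ("processing_segments", p), ("error_segments", e), ("pending_segments", q + 1)] := by
            simp [pvStatsStep, h1, h2, h3, PySem.Dict.modify, PySem.Dict.contains, PySem.Dict.insert,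
              PySem.Dict.getD, PySem.Dict.get?]
          rw [hstep, ih]
          have hn1 : pvGetStatus hd ≠ "completed" := by simpa using h1
          have hn2 : pvGetStatus hd ≠ "processing" := by simpa using h2
          have hn3 : pvGetStatus hd ≠ "error" := by simpa using h3
          simp [hn1, hn2, hn3]
          ring

lemma countP_partition (segments : List (List (String × String))) :
    (segments.countP (fun s =>
        ¬ (pvGetStatus s == "completed" ∨ pvGetStatus s == "processing" ∨ pvGetStatus s == "error")) : Int) =
      (segments.length : Int)
        - segments.countP (fun s => pvGetStatus s == "completed")
        - segments.countP (fun s => pvGetStatus s == "processing")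
        - segments.countP (fun s => pvGetStatus s == "error") := by
  induction segments with
  | nil => simp
  | cons hd tl ih =>
    simp only [List.countP_cons, List.length_cons]
    by_cases h1 : pvGetStatus hd == "completed" <;>
      by_cases h2 : pvGetStatus hd == "processing" <;>
        by_cases h3 : pvGetStatus hd == "error" <;>
          simp_all <;> push_cast <;> omega

theorem calculate_analysis_stats_py_spec : Claim_equal_calculate_analysis_stats_py := by
  intro segments _
  show calculate_analysis_stats_py segments = calculate_analysis_stats_py_alt segments
  simp only [calculate_analysis_stats_py, calculate_analysis_stats_py_alt,
    stats_fold_items, countP_partition]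
  norm_num
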